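-- pv_equiv track=rewrite | github.com/sauvik-d/sauvik-d | python_basics/nptel/DSA_using_python/w3q.py | expanding
-- ===== SOURCE A (Python) =====
-- def expanding(l):
--     if len(l) <= 1:
--         return True
--
--     prev_diff = abs(l[1] - l[0])
--     for i in range(1, len(l)-1):
--         diff = abs(l[i+1] - l[i])
--         if diff <= prev_diff:
--             return False
--         prev_diff = diff
--     return True
-- ===== SOURCE B (Python) =====
-- def expanding(l):
--     diffs = [abs(l[i + 1] - l[i]) for i in range(len(l) - 1)]
--     return diffs == sorted(diffs) and len(set(diffs)) == len(diffs)
-- ===== Notes on version B (the rewrite author's own statement) =====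
-- stated objective: alternative
-- what changed: Replaces A's fused streaming pass carrying prev_diff (with early return) by a sorting/dedup characterisation: build the list of consecutive absolute differences, then the list is strictly increasing iff it equals its own sorted copy and contains no duplicate values (len(set(diffs)) == len(diffs)).
import Mathlib
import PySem

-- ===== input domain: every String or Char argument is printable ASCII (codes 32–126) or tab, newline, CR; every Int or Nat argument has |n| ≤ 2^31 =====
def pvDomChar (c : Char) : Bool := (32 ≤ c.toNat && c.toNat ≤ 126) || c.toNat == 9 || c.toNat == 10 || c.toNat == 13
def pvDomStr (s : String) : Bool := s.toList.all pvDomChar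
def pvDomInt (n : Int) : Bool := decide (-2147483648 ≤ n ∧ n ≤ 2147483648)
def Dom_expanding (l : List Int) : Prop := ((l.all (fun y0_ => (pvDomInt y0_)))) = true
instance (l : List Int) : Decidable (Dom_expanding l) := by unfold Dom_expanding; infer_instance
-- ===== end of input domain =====

-- B replaces A's fused streaming pass (prev_diff, early return) by a sorting/dedup
-- characterisation: the difference list is strictly increasing iff it equals its own
-- sorted copy and has no duplicate values.

-- ===== PORT A =====
-- the for-loop over range(1, len(l)-1); 'return False' becomes the false branch
def expandingLoop (l : List Int) (prev : Int) : List Int → Bool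
  | [] => true
  | i :: rest =>
      let diff := |(PySem.List.pyGet? l (i + 1)).getD 0 - (PySem.List.pyGet? l i).getD 0|
      if diff ≤ prev then false else expandingLoop l diff rest

def expanding (l : List Int) : Bool :=
  if l.length ≤ 1 then true
  else
    expandingLoop l |(PySem.List.pyGet? l 1).getD 0 - (PySem.List.pyGet? l 0).getD 0|
      (PySem.List.pyRange 1 ((l.length : Int) - 1) 1)

-- ===== PORT B =====
def expanding_alt (l : List Int) : Bool :=
  let diffs := (PySem.List.pyRange 0 ((l.length : Int) - 1) 1).map
    (fun i => |PySem.List.pyGetD l (i + 1) 0 - PySem.List.pyGetD l i 0|)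
  decide (diffs = PySem.List.sorted diffs (fun x => x) false) &&
    ((PySem.Set.ofList diffs).length == diffs.length)

-- ===== PRECONDITION & SPEC =====
def Spec_expanding (l : List Int) (out : Bool) : Prop := out = expanding_alt l
instance (l : List Int) (out : Bool) : Decidable (Spec_expanding l out) := by unfold Spec_expanding; infer_instance

-- ===== CLAIM (what is proved, stated in full; the proofs are below) =====
def Claim_equal_expanding : Prop := ∀ (l : List Int), Dom_expanding l → Spec_expanding l (expanding l)

-- ===== LEMMAS AND PROOFS =====

-- abstract form of A's loop over the difference values themselves
def chain (prev : Int) : List Int → Bool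
  | [] => true
  | d :: ds => if d ≤ prev then false else chain d ds

def diffs (l : List Int) : List Int := (l.zip l.tail).map (fun p => |p.2 - p.1|)

theorem length_diffs (l : List Int) : (diffs l).length = l.length - 1 := by
  simp [diffs, List.length_zip, List.length_tail]

theorem getElem_diffs (l : List Int) (j : Nat) (h : j < (diffs l).length) :
    (diffs l)[j] = |l[j + 1]'(by have := length_diffs l; omega) - l[j]'(by have := length_diffs l; omega)| := by
  have hz : j < (l.zip l.tail).length := by simpa [diffs] using h
  simp [diffs, List.getElem_zip, List.getElem_tail]

-- A's index loop from j computes 'chain' on the suffix of the difference list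
theorem loop_eq_chain (l : List Int) (j : Nat) (prev : Int) :
    expandingLoop l prev (PySem.List.pyRange (j : Int) ((l.length : Int) - 1) 1) =
      chain prev ((diffs l).drop j) := by
  by_cases hj : j < l.length - 1
  · have hlt : (j : Int) < (l.length : Int) - 1 := by omega
    rw [PySem.List.pyRange_one_cons hlt]
    have hdj : j < (diffs l).length := by rw [length_diffs]; omega
    have hdrop : (diffs l).drop j = (diffs l)[j] :: (diffs l).drop (j + 1) :=
      List.drop_eq_getElem_cons hdj
    have hget : PySem.List.pyGet? l (j : Int) = some (l[j]'(by omega)) := by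
      rw [PySem.List.pyGet?_natCast]; exact List.getElem?_eq_getElem (by omega)
    have hget1 : PySem.List.pyGet? l ((j : Int) + 1) = some (l[j + 1]'(by omega)) := by
      have : ((j : Int) + 1) = ((j + 1 : Nat) : Int) := by push_cast; ring
      rw [this, PySem.List.pyGet?_natCast]; exact List.getElem?_eq_getElem (by omega)
    rw [hdrop]
    show (if |(PySem.List.pyGet? l ((j : Int) + 1)).getD 0 - (PySem.List.pyGet? l (j : Int)).getD 0| ≤ prev
          then false
          else expandingLoop l |(PySem.List.pyGet? l ((j : Int) + 1)).getD 0 - (PySem.List.pyGet? l (j : Int)).getD 0|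
                 (PySem.List.pyRange ((j : Int) + 1) ((l.length : Int) - 1) 1)) = _
    rw [hget, hget1, getElem_diffs l j hdj]
    simp only [Option.getD_some]
    split_ifs with hle
    · simp [chain, hle]
    · have : ((j : Int) + 1) = ((j + 1 : Nat) : Int) := by push_cast; ring
      rw [this, loop_eq_chain l (j + 1)]
      simp [chain, hle]
  · have hnil : PySem.List.pyRange (j : Int) ((l.length : Int) - 1) 1 = [] :=
      PySem.List.pyRange_one_eq_nil (by omega)
    have hdrop : (diffs l).drop j = [] := by
      apply List.drop_eq_nil_of_le; rw [length_diffs]; omega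
    rw [hnil, hdrop]; rfl
termination_by l.length - j

-- A's chain is: prev followed by ds is strictly increasing
theorem chain_pairwise (prev : Int) (ds : List Int) :
    chain prev ds = true ↔ (prev :: ds).Pairwise (· < ·) := by
  induction ds generalizing prev with
  | nil => simp [chain]
  | cons d ds ih =>
      simp only [chain]
      split_ifs with h
      · simp only [false_iff]
        intro hp
        have := List.rel_of_pairwise_cons hp (List.mem_cons_self)
        omega
      · rw [ih, List.pairwise_cons, List.pairwise_cons, List.pairwise_cons]
        constructor
        · rintro ⟨hd, hp⟩
          refine ⟨fun a ha => ?_, hd, hp⟩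
          rcases List.mem_cons.mp ha with rfl | ha
          · omega
          · exact lt_trans (by omega) (hd a ha)
        · rintro ⟨_, hd, hp⟩
          exact ⟨hd, hp⟩

-- A returns true exactly when the difference list is strictly increasing
theorem expanding_eq_true_iff (l : List Int) :
    expanding l = true ↔ (diffs l).Pairwise (· < ·) := by
  unfold expanding
  by_cases hlen : l.length ≤ 1
  · have hnil : diffs l = [] := by
      have := length_diffs l
      cases h : diffs l with
      | nil => rfl
      | cons d ds => exfalso; rw [h] at this; simp at this; omega
    simp [hlen, hnil]
  · have h2 : 2 ≤ l.length := by omega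
    have hd0 : 0 < (diffs l).length := by rw [length_diffs]; omega
    have hcons : diffs l = (diffs l)[0] :: (diffs l).drop 1 := List.drop_eq_getElem_cons hd0
    have hget : PySem.List.pyGet? l 0 = some (l[0]'(by omega)) := by
      have : (0 : Int) = ((0 : Nat) : Int) := rfl
      rw [this, PySem.List.pyGet?_natCast]; exact List.getElem?_eq_getElem (by omega)
    have hget1 : PySem.List.pyGet? l 1 = some (l[1]'(by omega)) := by
      have : (1 : Int) = ((1 : Nat) : Int) := rfl
      rw [this, PySem.List.pyGet?_natCast]; exact List.getElem?_eq_getElem (by omega)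
    have hloop := loop_eq_chain l 1 |(PySem.List.pyGet? l 1).getD 0 - (PySem.List.pyGet? l 0).getD 0|
    simp only [hlen, if_false, Nat.cast_one] at *
    rw [hloop, chain_pairwise, hget, hget1]
    simp only [Option.getD_some, ← getElem_diffs l 0 hd0, ← hcons]

-- B's comprehension over range(len(l)-1) is the zip-with-tail difference list
theorem comprehension_eq_diffs (l : List Int) :
    (PySem.List.pyRange 0 ((l.length : Int) - 1) 1).map
      (fun i => |PySem.List.pyGetD l (i + 1) 0 - PySem.List.pyGetD l i 0|) = diffs l := by
  apply List.ext_getElem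
  · simp [PySem.List.length_pyRange_one, length_diffs]
  · intro k h1 h2
    have hk : k < l.length - 1 := by
      have := length_diffs l; omega
    have hkr : k < (PySem.List.pyRange 0 ((l.length : Int) - 1) 1).length := by
      simpa using h1
    rw [List.getElem_map, PySem.List.getElem_pyRange_one]
    have hcast : (0 : Int) + (k : Int) = ((k : Nat) : Int) := by ring
    rw [hcast]
    have hcast1 : ((k : Nat) : Int) + 1 = ((k + 1 : Nat) : Int) := by push_cast; ring
    rw [hcast1, PySem.List.pyGetD_natCast, PySem.List.pyGetD_natCast]
    rw [List.getD_eq_getElem _ _ (by omega), List.getD_eq_getElem _ _ (by omega)]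
    rw [getElem_diffs l k (by rw [length_diffs]; omega)]

-- diffs == sorted(diffs) says the list is weakly increasing
theorem sorted_self_iff (ds : List Int) :
    ds = PySem.List.sorted ds (fun x => x) false ↔ ds.Pairwise (· ≤ ·) := by
  constructor
  · intro h
    have := PySem.List.sorted_pairwise ds (fun x => x)
    rw [← h] at this
    exact this
  · intro h
    exact (PySem.List.sorted_eq_self_of_pairwise ds (fun x => x) (by simpa using h)).symm

-- the discard used by Set.ofList is a sublist, so ofList is a sublist of its list
theorem ofList_sublist (xs : List Int) : (PySem.Set.ofList xs).Sublist xs := by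
  induction xs with
  | nil => simp [PySem.Set.ofList_nil]
  | cons x xs ih =>
      rw [PySem.Set.ofList_cons]
      have h1 : (PySem.Set.discard (PySem.Set.ofList xs) x).Sublist (PySem.Set.ofList xs) := by
        simp only [PySem.Set.discard]
        exact List.filter_sublist
      exact List.Sublist.cons₂ x (h1.trans ih)

-- len(set(ds)) == len(ds) says the list has no duplicates
theorem ofList_length_iff (ds : List Int) :
    (PySem.Set.ofList ds).length = ds.length ↔ ds.Nodup := by
  constructor
  · intro h
    have heq : PySem.Set.ofList ds = ds := (ofList_sublist ds).eq_of_length h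
    rw [← heq]
    exact PySem.Set.nodup_ofList ds
  · intro h
    rw [PySem.Set.ofList_eq_self_of_nodup ds h]

-- strictly increasing = weakly increasing with distinct entries
theorem pairwise_lt_iff (ds : List Int) :
    ds.Pairwise (· < ·) ↔ ds.Pairwise (· ≤ ·) ∧ ds.Nodup := by
  constructor
  · intro h
    exact ⟨h.imp le_of_lt, h.imp ne_of_lt⟩
  · rintro ⟨hle, hne⟩
    have := List.Pairwise.and hle hne
    exact this.imp (fun h => lt_of_le_of_ne h.1 h.2)

-- ===== VERDICT (by name: the statement is the Claim_ definition above) =====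
theorem expanding_spec : Claim_equal_expanding := by
  intro l _
  show expanding l = expanding_alt l
  rw [Bool.eq_iff_iff, expanding_eq_true_iff]
  unfold expanding_alt
  simp only [comprehension_eq_diffs, Bool.and_eq_true, decide_eq_true_eq, beq_iff_eq]
  rw [pairwise_lt_iff, ← sorted_self_iff, ← ofList_length_iff]
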